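-- pv_equiv track=rewrite | github.com/tonystark3110/nandaXagentcy | exchange_server.py | is_greeting_or_simple_query
-- ===== SOURCE A (Python) =====
-- def is_greeting_or_simple_query(query: str) -> bool:
--     """Fast pattern matching to detect greetings and simple queries"""
--     query_lower = query.lower().strip()
--
--     # Very short queries only (less than 10 words)
--     word_count = len(query_lower.split())
--     if word_count > 10:
--         return False
--
--     # Only match pure greetings
--     greeting_patterns = [
--         'hi', 'hello', 'hey', 'greetings', 'good morning',
--         'good afternoon', 'good evening', 'howdy', 'sup', 'yo'
--     ]
--
--     if any(query_lower == greeting or query_lower.startswith(greeting + " ")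
--            for greeting in greeting_patterns):
--         return True
--
--     return False
-- ===== SOURCE B (Python) =====
-- _SINGLES = ('hi', 'hello', 'hey', 'greetings', 'howdy', 'sup', 'yo')
-- _AFTER_GOOD = ('morning', 'afternoon', 'evening')
--
--
-- def is_greeting_or_simple_query(query: str) -> bool:
--     """Tokenize the head of the query once (find the first space) instead of
--     scanning the query against every greeting pattern."""
--     q = query.lower().strip()
--
--     if len(q.split()) > 10:
--         return False
--
--     i = q.find(' ')
--     head = q if i < 0 else q[:i]
--     if head in _SINGLES:
--         return True
--     if head != 'good':
--         return False
--     rest = q[i + 1:]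
--     j = rest.find(' ')
--     second = rest if j < 0 else rest[:j]
--     return second in _AFTER_GOOD
-- ===== Notes on version B (the rewrite author's own statement) =====
-- stated objective: alternative
-- what changed: Instead of testing the query against each of the 10 greeting patterns with equality/startswith, B extracts the first (and, after 'good', the second) space-delimited token once and checks it by set membership.
import Mathlib
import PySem

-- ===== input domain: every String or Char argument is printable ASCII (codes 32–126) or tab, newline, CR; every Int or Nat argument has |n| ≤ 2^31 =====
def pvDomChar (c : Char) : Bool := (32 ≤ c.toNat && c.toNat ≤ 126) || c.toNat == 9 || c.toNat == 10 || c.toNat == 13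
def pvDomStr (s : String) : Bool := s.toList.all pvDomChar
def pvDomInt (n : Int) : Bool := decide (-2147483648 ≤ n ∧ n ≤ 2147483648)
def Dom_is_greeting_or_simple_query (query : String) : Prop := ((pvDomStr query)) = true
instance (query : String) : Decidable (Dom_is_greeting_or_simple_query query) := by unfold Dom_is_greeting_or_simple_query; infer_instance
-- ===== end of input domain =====

-- B tokenizes the head of the query once instead of scanning it against every greeting pattern.

-- ===== PORT A =====
def pvGreetingPatterns : List String :=
  ["hi", "hello", "hey", "greetings", "good morning",
   "good afternoon", "good evening", "howdy", "sup", "yo"]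

def is_greeting_or_simple_query (query : String) : Bool :=
  let query_lower := PySem.Str.strip (PySem.Str.lower query)
  let word_count := (PySem.Str.split₀ query_lower).length
  if word_count > 10 then
    false
  else if pvGreetingPatterns.any (fun greeting =>
      query_lower == greeting || PySem.Str.startswith query_lower (greeting ++ " ")) then
    true
  else
    false

-- ===== PORT B =====
def pvSingles : List String := ["hi", "hello", "hey", "greetings", "howdy", "sup", "yo"]
def pvAfterGood : List String := ["morning", "afternoon", "evening"]

def is_greeting_or_simple_query_alt (query : String) : Bool :=
  let q := PySem.Str.strip (PySem.Str.lower query)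
  if (PySem.Str.split₀ q).length > 10 then
    false
  else
    let i := PySem.Str.find q " "
    let head := if i < 0 then q else PySem.Str.slice q none (some i)
    if pvSingles.contains head then
      true
    else if head != "good" then
      false
    else
      let rest := PySem.Str.slice q (some (i + 1)) none
      let j := PySem.Str.find rest " "
      let second := if j < 0 then rest else PySem.Str.slice rest none (some j)
      pvAfterGood.contains second

-- ===== PRECONDITION & SPEC =====
def Spec_is_greeting_or_simple_query (query : String) (out : Bool) : Prop := out = is_greeting_or_simple_query_alt query
instance (query : String) (out : Bool) : Decidable (Spec_is_greeting_or_simple_query query out) := by unfold Spec_is_greeting_or_simple_query; infer_instance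

-- ===== CLAIM (what is proved, stated in full; the proofs are below) =====
def Claim_equal_is_greeting_or_simple_query : Prop := ∀ (query : String), Dom_is_greeting_or_simple_query query → Spec_is_greeting_or_simple_query query (is_greeting_or_simple_query query)

-- ===== LEMMAS AND PROOFS =====

lemma pv_infix_singleton_iff (a : Char) (l : List Char) : [a] <:+: l ↔ a ∈ l := by
  constructor
  · intro h; exact h.sublist.mem (by simp)
  · intro h
    obtain ⟨s, t, rfl⟩ := List.append_of_mem h
    exact ⟨s, t, by simp⟩

lemma pv_exists_space_split (cs : List Char) (h : ' ' ∈ cs) :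
    ∃ t r, cs = t ++ ' ' :: r ∧ ' ' ∉ t := by
  induction cs with
  | nil => simp at h
  | cons c cs ih =>
    by_cases hc : c = ' '
    · exact ⟨[], cs, by simp [hc], by simp⟩
    · have h' : ' ' ∈ cs := by
        rcases List.mem_cons.mp h with h | h
        · exact absurd h.symm hc
        · exact h
      obtain ⟨t, r, rfl, ht⟩ := ih h'
      exact ⟨c :: t, r, rfl, by simp [ht]; exact fun e => hc e.symm⟩

lemma pv_find_space_split (t r : List Char) (ht : ' ' ∉ t) :
    PySem.Chars.find (t ++ ' ' :: r) [' '] = (t.length : Int) := by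
  have hmem : ' ' ∈ t ++ ' ' :: r := by simp
  have hnn : 0 ≤ PySem.Chars.find (t ++ ' ' :: r) [' '] :=
    (PySem.Chars.find_nonneg_iff _ _).mpr ((pv_infix_singleton_iff _ _).mpr hmem)
  obtain ⟨hpre, hmin⟩ := PySem.Chars.find_spec hnn
  set k := (PySem.Chars.find (t ++ ' ' :: r) [' ']).toNat with hk
  have hkt : k = t.length := by
    rcases Nat.lt_trichotomy k t.length with hlt | heq | hgt
    · exfalso
      rw [List.drop_append_of_le_length (Nat.le_of_lt hlt)] at hpre
      have : t.drop k ≠ [] := by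
        intro he; rw [List.drop_eq_nil_iff] at he; omega
      obtain ⟨c, l, he⟩ := List.exists_cons_of_ne_nil this
      rw [he, List.cons_append, List.cons_prefix_cons] at hpre
      have : c ∈ t := by
        have : c ∈ t.drop k := by simp [he]
        exact List.mem_of_mem_drop this
      exact ht (hpre.1 ▸ this)
    · exact heq
    · exfalso
      exact hmin t.length hgt (by rw [List.drop_left]; simp)
  omega

lemma pv_find_no_space (cs : List Char) (h : ' ' ∉ cs) :
    PySem.Chars.find cs [' '] = -1 :=
  (PySem.Chars.find_eq_neg_one_iff _ _).mpr (fun hin => h ((pv_infix_singleton_iff _ _).mp hin))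

lemma pv_prefix_align (g t v r : List Char) (hg : ' ' ∉ g) (ht : ' ' ∉ t) :
    g ++ ' ' :: v <+: t ++ ' ' :: r ↔ g = t ∧ v <+: r := by
  induction g generalizing t with
  | nil =>
    cases t with
    | nil => simp [List.cons_prefix_cons]
    | cons c t' =>
      have hc : c ≠ ' ' := fun e => ht (by simp [e])
      simp only [List.nil_append, List.cons_append]
      constructor
      · intro h
        rw [List.cons_prefix_cons] at h
        exact absurd h.1.symm hc
      · rintro ⟨h, -⟩
        exact absurd h (by simp)
  | cons a g' ih =>
    have ha : a ≠ ' ' := fun e => hg (by simp [e])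
    cases t with
    | nil =>
      simp only [List.cons_append, List.nil_append, List.cons_prefix_cons]
      simp [ha]
    | cons c t' =>
      have hg' : ' ' ∉ g' := fun e => hg (by simp [e])
      have ht' : ' ' ∉ t' := fun e => ht (by simp [e])
      simp only [List.cons_append, List.cons_prefix_cons, ih t' hg' ht']
      constructor
      · rintro ⟨rfl, rfl, h⟩
        exact ⟨rfl, h⟩
      · rintro ⟨he, h⟩
        have h1 : a = c := by injection he
        have h2 : g' = t' := by injection he
        subst h1; subst h2
        exact ⟨rfl, rfl, h⟩

lemma pv_eq_align (g t v r : List Char) (hg : ' ' ∉ g) (ht : ' ' ∉ t) :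
    g ++ ' ' :: v = t ++ ' ' :: r ↔ g = t ∧ v = r := by
  constructor
  · intro he
    have hp : g ++ ' ' :: v <+: t ++ ' ' :: r := he ▸ List.prefix_refl _
    obtain ⟨rfl, -⟩ := (pv_prefix_align g t v r hg ht).mp hp
    have := List.append_cancel_left he
    exact ⟨rfl, by injection this⟩
  · rintro ⟨rfl, rfl⟩; rfl

-- single-word pattern, query with no space: only exact equality matches
lemma pv_pm_single_no (p cs : List Char) (_hp : ' ' ∉ p) (hcs : ' ' ∉ cs) :
    (cs = p ∨ p ++ [' '] <+: cs) ↔ cs = p := by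
  constructor
  · rintro (h | h)
    · exact h
    · exact absurd (h.sublist.mem (by simp)) hcs
  · exact Or.inl

-- single-word pattern, query with a first space: matches iff the head token equals it
lemma pv_pm_single_split (p t r : List Char) (hp : ' ' ∉ p) (ht : ' ' ∉ t) :
    (t ++ ' ' :: r = p ∨ p ++ [' '] <+: t ++ ' ' :: r) ↔ t = p := by
  constructor
  · rintro (h | h)
    · exact absurd (h ▸ (by simp : ' ' ∈ t ++ ' ' :: r)) hp
    · exact ((pv_prefix_align p t [] r hp ht).mp h).1.symm
  · rintro rfl
    exact Or.inr ((pv_prefix_align t t [] r hp ht).mpr ⟨rfl, List.nil_prefix⟩)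

-- two-word pattern, query with no space: never matches
lemma pv_pm_double_no (p cs : List Char) (hp : ' ' ∈ p) (hcs : ' ' ∉ cs) :
    ¬ (cs = p ∨ p ++ [' '] <+: cs) := by
  rintro (rfl | h)
  · exact hcs hp
  · exact hcs (h.sublist.mem (by simp [hp]))

-- two-word pattern against a query split at its first space
lemma pv_pm_double_split (g1 X t r : List Char) (hg1 : ' ' ∉ g1) (hX : ' ' ∉ X) (ht : ' ' ∉ t) :
    (t ++ ' ' :: r = g1 ++ ' ' :: X ∨ (g1 ++ ' ' :: X) ++ [' '] <+: t ++ ' ' :: r) ↔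
      t = g1 ∧ (r = X ∨ X ++ [' '] <+: r) := by
  have hassoc : (g1 ++ ' ' :: X) ++ [' '] = g1 ++ ' ' :: (X ++ [' ']) := by simp
  rw [hassoc, pv_eq_align t g1 r X ht hg1, pv_prefix_align g1 t (X ++ [' ']) r hg1 ht]
  constructor
  · rintro (⟨rfl, rfl⟩ | ⟨rfl, h⟩)
    · exact ⟨rfl, Or.inl rfl⟩
    · exact ⟨rfl, Or.inr h⟩
  · rintro ⟨rfl, (rfl | h)⟩
    · exact Or.inl ⟨rfl, rfl⟩
    · exact Or.inr ⟨rfl, h⟩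

-- B's tail of the branch structure as one boolean formula
lemma pv_bool_shape (a d : Bool) (h g : String) :
    (if a then true else if h != g then false else d) = (a || (h == g) && d) := by
  cases a <;> by_cases he : h = g <;> simp [he]

lemma pv_shuffle (a b c d e f g p m n o : Prop) :
    (a ∨ b ∨ c ∨ d ∨ (p ∧ m) ∨ (p ∧ n) ∨ (p ∧ o) ∨ e ∨ f ∨ g) ↔
      ((a ∨ b ∨ c ∨ d ∨ e ∨ f ∨ g) ∨ p ∧ (m ∨ n ∨ o)) := by
  tauto

lemma pv_if_id (b : Bool) : (if b then true else false) = b := by cases b <;> simp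

set_option maxHeartbeats 1000000 in
-- the core equivalence: A's pattern scan equals B's head-token dispatch
lemma pv_core (s : String) :
    (pvGreetingPatterns.any (fun greeting =>
        s == greeting || PySem.Str.startswith s (greeting ++ " "))) =
    (if pvSingles.contains
          (if PySem.Str.find s " " < 0 then s
           else PySem.Str.slice s none (some (PySem.Str.find s " "))) then
       true
     else if (if PySem.Str.find s " " < 0 then s
              else PySem.Str.slice s none (some (PySem.Str.find s " "))) != "good" then
       false
     else
       pvAfterGood.contains
         (if PySem.Str.find (PySem.Str.slice s (some (PySem.Str.find s " " + 1)) none) " " < 0 then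
            PySem.Str.slice s (some (PySem.Str.find s " " + 1)) none
          else
            PySem.Str.slice (PySem.Str.slice s (some (PySem.Str.find s " " + 1)) none) none
              (some (PySem.Str.find (PySem.Str.slice s (some (PySem.Str.find s " " + 1)) none) " ")))) := by
  have hsp1 : (" " : String).toList = [' '] := rfl
  by_cases hgood : s = "good"
  · subst hgood; decide
  by_cases hsp : ' ' ∈ s.toList
  · obtain ⟨t, r, h, ht⟩ := pv_exists_space_split s.toList hsp
    have hi : PySem.Str.find s " " = (t.length : Int) := by
      rw [PySem.Str.find_eq, hsp1, h]; exact pv_find_space_split t r ht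
    have hineg : ¬ ((t.length : Int) < 0) := by omega
    have hhead : (PySem.Str.slice s none (some ((t.length : Int)))).toList = t := by
      rw [PySem.Str.toList_slice, PySem.Chars.slice_eq_listSlice,
        PySem.List.slice_to _ (by omega), Int.toNat_natCast, h, List.take_left]
    have hrest : (PySem.Str.slice s (some ((t.length : Int) + 1)) none).toList = r := by
      rw [PySem.Str.toList_slice, PySem.Chars.slice_eq_listSlice,
        PySem.List.slice_from _ (by omega), h]
      have h1 : (((t.length : Int)) + 1).toNat = (t ++ [' ']).length := by
        simp
      have h2 : t ++ ' ' :: r = (t ++ [' ']) ++ r := by simp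
      rw [h1, h2, List.drop_left]
    rw [hi, if_neg hineg, pv_bool_shape, Bool.eq_iff_iff]
    by_cases hr : ' ' ∈ r
    · obtain ⟨t2, r2, h2, ht2⟩ := pv_exists_space_split r hr
      have hj : PySem.Str.find (PySem.Str.slice s (some ((t.length : Int) + 1)) none) " " = (t2.length : Int) := by
        rw [PySem.Str.find_eq, hsp1, hrest, h2]; exact pv_find_space_split t2 r2 ht2
      have hjneg : ¬ ((t2.length : Int) < 0) := by omega
      have hsec : (PySem.Str.slice (PySem.Str.slice s (some ((t.length : Int) + 1)) none) none
          (some ((t2.length : Int)))).toList = t2 := by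
        rw [PySem.Str.toList_slice, PySem.Chars.slice_eq_listSlice,
          PySem.List.slice_to _ (by omega), Int.toNat_natCast, hrest, h2, List.take_left]
      rw [hj, if_neg hjneg]
      simp only [pvGreetingPatterns, pvSingles, pvAfterGood, List.any_cons, List.any_nil,
        List.contains_cons, List.contains_nil, Bool.or_eq_true, Bool.and_eq_true,
        beq_iff_eq, PySem.Str.startswith_eq, PySem.Chars.startswith_iff,
        ← String.toList_inj, String.toList_append, hsp1, h, hhead, hsec]
      have hgm : ("good morning" : String).toList = "good".toList ++ ' ' :: "morning".toList := rfl
      have hga : ("good afternoon" : String).toList = "good".toList ++ ' ' :: "afternoon".toList := rfl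
      have hge : ("good evening" : String).toList = "good".toList ++ ' ' :: "evening".toList := rfl
      rw [hgm, hga, hge, h2]
      have e1 := pv_pm_single_split "hi".toList t (t2 ++ ' ' :: r2) (by decide) ht
      have e2 := pv_pm_single_split "hello".toList t (t2 ++ ' ' :: r2) (by decide) ht
      have e3 := pv_pm_single_split "hey".toList t (t2 ++ ' ' :: r2) (by decide) ht
      have e4 := pv_pm_single_split "greetings".toList t (t2 ++ ' ' :: r2) (by decide) ht
      have e5 := pv_pm_single_split "howdy".toList t (t2 ++ ' ' :: r2) (by decide) ht
      have e6 := pv_pm_single_split "sup".toList t (t2 ++ ' ' :: r2) (by decide) ht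
      have e7 := pv_pm_single_split "yo".toList t (t2 ++ ' ' :: r2) (by decide) ht
      have d1 := pv_pm_double_split "good".toList "morning".toList t (t2 ++ ' ' :: r2) (by decide) (by decide) ht
      have d2 := pv_pm_double_split "good".toList "afternoon".toList t (t2 ++ ' ' :: r2) (by decide) (by decide) ht
      have d3 := pv_pm_double_split "good".toList "evening".toList t (t2 ++ ' ' :: r2) (by decide) (by decide) ht
      have i1 := pv_pm_single_split "morning".toList t2 r2 (by decide) ht2
      have i2 := pv_pm_single_split "afternoon".toList t2 r2 (by decide) ht2
      have i3 := pv_pm_single_split "evening".toList t2 r2 (by decide) ht2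
      simp only [e1, e2, e3, e4, e5, e6, e7, d1, d2, d3, i1, i2, i3,
        Bool.false_eq_true, or_false]
      exact pv_shuffle _ _ _ _ _ _ _ _ _ _ _
    · have hj : PySem.Str.find (PySem.Str.slice s (some ((t.length : Int) + 1)) none) " " = -1 := by
        rw [PySem.Str.find_eq, hsp1, hrest]; exact pv_find_no_space r hr
      rw [hj, if_pos (by norm_num)]
      simp only [pvGreetingPatterns, pvSingles, pvAfterGood, List.any_cons, List.any_nil,
        List.contains_cons, List.contains_nil, Bool.or_eq_true, Bool.and_eq_true,
        beq_iff_eq, PySem.Str.startswith_eq, PySem.Chars.startswith_iff,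
        ← String.toList_inj, String.toList_append, hsp1, h, hhead, hrest]
      have hgm : ("good morning" : String).toList = "good".toList ++ ' ' :: "morning".toList := rfl
      have hga : ("good afternoon" : String).toList = "good".toList ++ ' ' :: "afternoon".toList := rfl
      have hge : ("good evening" : String).toList = "good".toList ++ ' ' :: "evening".toList := rfl
      rw [hgm, hga, hge]
      have e1 := pv_pm_single_split "hi".toList t r (by decide) ht
      have e2 := pv_pm_single_split "hello".toList t r (by decide) ht
      have e3 := pv_pm_single_split "hey".toList t r (by decide) ht
      have e4 := pv_pm_single_split "greetings".toList t r (by decide) ht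
      have e5 := pv_pm_single_split "howdy".toList t r (by decide) ht
      have e6 := pv_pm_single_split "sup".toList t r (by decide) ht
      have e7 := pv_pm_single_split "yo".toList t r (by decide) ht
      have d1 := pv_pm_double_split "good".toList "morning".toList t r (by decide) (by decide) ht
      have d2 := pv_pm_double_split "good".toList "afternoon".toList t r (by decide) (by decide) ht
      have d3 := pv_pm_double_split "good".toList "evening".toList t r (by decide) (by decide) ht
      have i1 := pv_pm_single_no "morning".toList r (by decide) hr
      have i2 := pv_pm_single_no "afternoon".toList r (by decide) hr
      have i3 := pv_pm_single_no "evening".toList r (by decide) hr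
      simp only [e1, e2, e3, e4, e5, e6, e7, d1, d2, d3, i1, i2, i3,
        Bool.false_eq_true, or_false]
      exact pv_shuffle _ _ _ _ _ _ _ _ _ _ _
  · have hi : PySem.Str.find s " " = -1 := by
      rw [PySem.Str.find_eq, hsp1]; exact pv_find_no_space _ hsp
    have hrest0 : (PySem.Str.slice s (some ((-1 : Int) + 1)) none).toList = s.toList := by
      rw [PySem.Str.toList_slice, PySem.Chars.slice_eq_listSlice,
        PySem.List.slice_from _ (by omega)]
      simp
    have hj : PySem.Str.find (PySem.Str.slice s (some ((-1 : Int) + 1)) none) " " = -1 := by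
      rw [PySem.Str.find_eq, hsp1, hrest0]; exact pv_find_no_space _ hsp
    rw [hi, if_pos (show ((-1 : Int) < 0) by norm_num), pv_bool_shape, hj,
      if_pos (show ((-1 : Int) < 0) by norm_num), Bool.eq_iff_iff]
    simp only [pvGreetingPatterns, pvSingles, pvAfterGood, List.any_cons, List.any_nil,
      List.contains_cons, List.contains_nil, Bool.or_eq_true, Bool.and_eq_true,
      beq_iff_eq, PySem.Str.startswith_eq, PySem.Chars.startswith_iff,
      ← String.toList_inj, String.toList_append, hsp1, hrest0]
    have hgoodf : ¬ (s.toList = ("good" : String).toList) := fun e => hgood (String.toList_inj.mp e)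
    have e1 := pv_pm_single_no "hi".toList s.toList (by decide) hsp
    have e2 := pv_pm_single_no "hello".toList s.toList (by decide) hsp
    have e3 := pv_pm_single_no "hey".toList s.toList (by decide) hsp
    have e4 := pv_pm_single_no "greetings".toList s.toList (by decide) hsp
    have e5 := pv_pm_single_no "howdy".toList s.toList (by decide) hsp
    have e6 := pv_pm_single_no "sup".toList s.toList (by decide) hsp
    have e7 := pv_pm_single_no "yo".toList s.toList (by decide) hsp
    have d1 := pv_pm_double_no "good morning".toList s.toList (by decide) hsp
    have d2 := pv_pm_double_no "good afternoon".toList s.toList (by decide) hsp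
    have d3 := pv_pm_double_no "good evening".toList s.toList (by decide) hsp
    simp only [e1, e2, e3, e4, e5, e6, e7, d1, d2, d3, hgoodf,
      Bool.false_eq_true, or_false, false_or, false_and]

-- ===== VERDICT (by name: the statement is the Claim_ definition above) =====
theorem is_greeting_or_simple_query_spec : Claim_equal_is_greeting_or_simple_query := by
  intro query _
  unfold Spec_is_greeting_or_simple_query
  unfold is_greeting_or_simple_query is_greeting_or_simple_query_alt
  simp only []
  split
  · rfl
  · rw [pv_if_id]
    exact pv_core _
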